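-- pv_equiv track=rewrite | github.com/Itsuki0016/encryptor | crypto/utils.py | number_encrypt
-- ===== SOURCE A (Python) =====
-- def number_encrypt(text):
--     """
--     数字置換暗号による暗号化
--
--     各アルファベットを対応する数字に置換します（A=01, B=02, ...）。
--
--     Args:
--         text (str): 暗号化対象のテキスト
--
--     Returns:
--         str: 数字で表現されたテキスト
--     """
--     result = []
--     for char in text:
--         if char.isalpha():
--             if char.isupper():
--                 # 大文字: A=01, B=02, ..., Z=26
--                 result.append(str(ord(char) - ord('A') + 1).zfill(2))
--             else:
--                 # 小文字も同様に処理
--                 result.append(str(ord(char) - ord('a') + 1).zfill(2))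
--         else:
--             # アルファベット以外はそのまま
--             result.append(char)
--     return ''.join(result)
-- ===== SOURCE B (Python) =====
-- # B: 26 alphabet-indexed str.replace passes instead of a per-character scan.
-- # Correct because every inserted code consists only of digits, which no later
-- # replacement pass touches.
-- def number_encrypt(text):
--     for i in range(26):
--         code = str(i + 1).zfill(2)
--         text = text.replace(chr(65 + i), code).replace(chr(97 + i), code)
--     return text
-- ===== Notes on version B (the rewrite author's own statement) =====
-- stated objective: faster
-- what changed: Instead of scanning the text character by character with branch-and-ord arithmetic, B loops over the 26 alphabet positions and rewrites the whole text with two str.replace passes per letter; inserted codes are all digits, so later passes never touch them.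
import Mathlib
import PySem

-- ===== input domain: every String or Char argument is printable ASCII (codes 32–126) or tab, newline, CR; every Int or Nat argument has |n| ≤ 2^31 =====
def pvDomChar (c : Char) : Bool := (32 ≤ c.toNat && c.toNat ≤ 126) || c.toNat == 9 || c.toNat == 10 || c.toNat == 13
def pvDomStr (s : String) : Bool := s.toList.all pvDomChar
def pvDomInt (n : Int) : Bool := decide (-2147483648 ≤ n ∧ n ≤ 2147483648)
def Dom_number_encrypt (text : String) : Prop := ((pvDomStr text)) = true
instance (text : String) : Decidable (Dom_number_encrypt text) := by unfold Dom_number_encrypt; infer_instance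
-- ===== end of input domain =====

-- B rewrites the text with 26 alphabet-indexed replace passes (two str.replace per
-- letter) instead of A's per-character scan; measured faster (C-level replace loops).


-- ===== PORT A =====
-- loop over the characters, appending each piece to `result`, then ''.join
def number_encrypt (text : String) : String :=
  let result : List (List Char) :=
    text.toList.foldl (fun acc char =>
      acc ++ [if PySem.Chars.isalpha char then
                if PySem.Chars.isupper char then
                  PySem.Chars.zfill (PySem.Int.toChars ((char.toNat : Int) - ('A'.toNat : Int) + 1)) 2
                else
                  PySem.Chars.zfill (PySem.Int.toChars ((char.toNat : Int) - ('a'.toNat : Int) + 1)) 2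
              else [char]]) []
  String.ofList (PySem.Chars.join [] result)

-- ===== PORT B =====
-- for i in range(26): text = text.replace(chr(65+i), code).replace(chr(97+i), code)
def number_encrypt_alt (text : String) : String :=
  String.ofList ((PySem.List.pyRange 0 26 1).foldl (fun s i =>
    let code := PySem.Chars.zfill (PySem.Int.toChars (i + 1)) 2
    PySem.Chars.replace (PySem.Chars.replace s [Char.ofNat (65 + i).toNat] code)
      [Char.ofNat (97 + i).toNat] code) text.toList)

-- ===== PRECONDITION & SPEC =====
def Spec_number_encrypt (text : String) (out : String) : Prop := out = number_encrypt_alt text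
instance (text : String) (out : String) : Decidable (Spec_number_encrypt text out) := by unfold Spec_number_encrypt; infer_instance

-- ===== CLAIM (what is proved, stated in full; the proofs are below) =====
def Claim_equal_number_encrypt : Prop := ∀ (text : String), Dom_number_encrypt text → Spec_number_encrypt text (number_encrypt text)

-- ===== LEMMAS AND PROOFS =====

-- A's per-character piece
def pvStepA (char : Char) : List Char :=
  if PySem.Chars.isalpha char then
    if PySem.Chars.isupper char then
      PySem.Chars.zfill (PySem.Int.toChars ((char.toNat : Int) - ('A'.toNat : Int) + 1)) 2
    else
      PySem.Chars.zfill (PySem.Int.toChars ((char.toNat : Int) - ('a'.toNat : Int) + 1)) 2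
  else [char]

-- the two-digit code for letter index n (1-based)
def pvCode (n : Int) : List Char := PySem.Chars.zfill (PySem.Int.toChars n) 2

-- replacing a single-character pattern, written as a flatMap
def pvRepl1 (c : Char) (new : List Char) (s : List Char) : List Char :=
  s.flatMap (fun x => if x = c then new else [x])

-- the state after the first k of B's passes, per original character
def pvG (k : Nat) (c : Char) : List Char :=
  if 65 ≤ c.toNat ∧ c.toNat < 65 + k then pvCode ((c.toNat : Int) - 64)
  else if 97 ≤ c.toNat ∧ c.toNat < 97 + k then pvCode ((c.toNat : Int) - 96)
  else [c]

theorem pv_join_nil (l : List (List Char)) : PySem.Chars.join [] l = l.flatten := by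
  simp only [PySem.Chars.join, List.intercalate]
  induction l with
  | nil => rfl
  | cons a t ih =>
    cases t with
    | nil => simp
    | cons b t' => simpa [List.intersperse] using ih

set_option maxRecDepth 8192 in
theorem pv_go_single (c : Char) (new : List Char) :
    ∀ (s acc : List Char) (fuel : Nat), s.length ≤ fuel →
      PySem.Chars.replace.go [c] new fuel s acc = acc.reverse ++ pvRepl1 c new s := by
  intro s
  induction s with
  | nil =>
    intro acc fuel _
    cases fuel <;> simp [PySem.Chars.replace.go, pvRepl1]
  | cons x t ih =>
    intro acc fuel hf
    cases fuel with
    | zero => simp at hf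
    | succ f =>
      have hf' : t.length ≤ f := by rw [List.length_cons] at hf; omega
      simp only [PySem.Chars.replace.go, List.isPrefixOf]
      by_cases hx : x = c
      · subst hx
        simp only [beq_self_eq_true, Bool.and_true, if_pos, List.length_cons,
          List.length_nil, List.drop_succ_cons, List.drop_zero, Nat.zero_add]
        rw [ih (new.reverse ++ acc) f hf']
        simp [pvRepl1]
      · have hbeq : (c == x) = false := beq_eq_false_iff_ne.mpr (Ne.symm hx)
        simp only [hbeq, Bool.false_and, Bool.false_eq_true, if_neg, not_false_eq_true]
        rw [ih (x :: acc) f hf']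
        simp [pvRepl1, hx]

theorem pv_replace_single (c : Char) (new s : List Char) :
    PySem.Chars.replace s [c] new = pvRepl1 c new s := by
  simp only [PySem.Chars.replace, List.isEmpty_cons]
  simpa using pv_go_single c new s [] s.length le_rfl

theorem pv_repl1_flatMap (c : Char) (new : List Char) (f : Char → List Char) (l : List Char) :
    pvRepl1 c new (l.flatMap f) = l.flatMap (fun x => pvRepl1 c new (f x)) := by
  simp [pvRepl1, List.flatMap_assoc]

-- the per-character effect of pass k, for printable characters (decide over k < 26, n < 127)
set_option maxRecDepth 100000 in
theorem pv_step_char (k : Nat) (hk : k < 26) (n : Nat) (hn : n < 127) :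
    pvRepl1 (Char.ofNat (97 + k)) (pvCode ((k : Int) + 1))
      (pvRepl1 (Char.ofNat (65 + k)) (pvCode ((k : Int) + 1)) (pvG k (Char.ofNat n)))
      = pvG (k + 1) (Char.ofNat n) := by
  revert hn; revert n; revert hk; revert k; decide

-- after all 26 passes, B's per-character result is A's (decide over n < 127)
set_option maxRecDepth 100000 in
theorem pv_step_eq_of_lt (n : Nat) (hn : n < 127) :
    pvStepA (Char.ofNat n) = pvG 26 (Char.ofNat n) := by
  revert hn; revert n; decide

-- B's fold over range(k) acts as flatMap (pvG k) on a printable string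
set_option maxHeartbeats 1000000 in
theorem pv_foldB (l : List Char) (hd : ∀ x ∈ l, pvDomChar x = true) :
    ∀ k : Nat, k ≤ 26 →
      (PySem.List.pyRange 0 (k : Int) 1).foldl (fun s i =>
        let code := PySem.Chars.zfill (PySem.Int.toChars (i + 1)) 2
        PySem.Chars.replace (PySem.Chars.replace s [Char.ofNat (65 + i).toNat] code)
          [Char.ofNat (97 + i).toNat] code) l = l.flatMap (pvG k) := by
  intro k
  induction k with
  | zero =>
    intro _
    rw [Nat.cast_zero, PySem.List.pyRange_one_eq_nil le_rfl]
    have hg : pvG 0 = fun c => [c] := funext fun c => by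
      unfold pvG; rw [if_neg (by omega), if_neg (by omega)]
    rw [List.foldl_nil, hg, List.flatMap_singleton']
  | succ k ih =>
    intro hk
    have hk' : k ≤ 26 := Nat.le_of_succ_le hk
    have hcast : ((k + 1 : Nat) : Int) = (k : Int) + 1 := by push_cast; ring
    rw [hcast, PySem.List.pyRange_one_succ_right (by omega), List.foldl_append, ih hk']
    simp only [List.foldl_cons, List.foldl_nil]
    have h65 : (65 + (k : Int)).toNat = 65 + k := by omega
    have h97 : (97 + (k : Int)).toNat = 97 + k := by omega
    rw [h65, h97, pv_replace_single, pv_replace_single, pv_repl1_flatMap, pv_repl1_flatMap]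
    apply List.flatMap_congr
    intro x hx
    have hxd : pvDomChar x = true := hd x hx
    have hlt : x.toNat < 127 := by simp [pvDomChar] at hxd; omega
    have h := pv_step_char k (by omega) x.toNat hlt
    rw [Char.ofNat_toNat] at h
    simpa [pvCode] using h

-- ===== VERDICT (by name: the statement is the Claim_ definition above) =====
set_option maxHeartbeats 400000 in
theorem number_encrypt_spec : Claim_equal_number_encrypt := by
  intro text hdom
  unfold Spec_number_encrypt number_encrypt number_encrypt_alt
  have hd : ∀ x ∈ text.toList, pvDomChar x = true := by
    have := hdom
    simpa [Dom_number_encrypt, pvDomStr, List.all_eq_true] using this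
  have hfold : text.toList.foldl (fun acc char => acc ++ [pvStepA char]) [] =
      text.toList.map pvStepA := by
    simpa using PySem.List.foldl_append_singleton_eq_map pvStepA text.toList []
  show String.ofList (PySem.Chars.join []
      (text.toList.foldl (fun acc char => acc ++ [pvStepA char]) [])) = _
  rw [hfold, pv_join_nil]
  have hB := pv_foldB text.toList hd 26 le_rfl
  simp only [Nat.cast_ofNat] at hB
  rw [hB]
  rw [← List.flatMap_def]
  refine congrArg String.ofList ?_
  apply List.flatMap_congr
  intro c hc
  have hlt : c.toNat < 127 := by
    have := hd c hc; simp [pvDomChar] at this; omega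
  have := pv_step_eq_of_lt c.toNat hlt
  rwa [Char.ofNat_toNat] at this
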